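-- pv_equiv track=rewrite | github.com/mbido/advent-of-code | python/aoc_2024/src/day_25.py | to_cols
-- ===== SOURCE A (Python) =====
-- def to_cols(grid):
--     res = []
--     for x in range(len(grid[0])):
--         height = 0
--         for y in range(len(grid)):
--             if grid[y][x] == "#":
--                 height += 1
--         res.append(height - 1)
--     return res
-- ===== SOURCE B (Python) =====
-- def to_cols(grid):
--     # collect column positions of every '#' by scanning row characters
--     positions = []
--     for row in grid:
--         for x, c in enumerate(row):
--             if c == "#":
--                 positions.append(x)
--     # hash index: occurrences per column
--     counts = {}
--     for x in positions:
--         counts[x] = counts.get(x, 0) + 1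
--     return [counts.get(x, 0) - 1 for x in range(len(grid[0]))]
-- ===== Notes on version B (the rewrite author's own statement) =====
-- stated objective: alternative
-- what changed: B never scans the grid per column: it scans each row's characters once to collect the column positions of all '#' into a flat list, builds a hash counter over those positions, and reads the output off the counter, replacing A's per-column inner pass over all rows.
import Mathlib
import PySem

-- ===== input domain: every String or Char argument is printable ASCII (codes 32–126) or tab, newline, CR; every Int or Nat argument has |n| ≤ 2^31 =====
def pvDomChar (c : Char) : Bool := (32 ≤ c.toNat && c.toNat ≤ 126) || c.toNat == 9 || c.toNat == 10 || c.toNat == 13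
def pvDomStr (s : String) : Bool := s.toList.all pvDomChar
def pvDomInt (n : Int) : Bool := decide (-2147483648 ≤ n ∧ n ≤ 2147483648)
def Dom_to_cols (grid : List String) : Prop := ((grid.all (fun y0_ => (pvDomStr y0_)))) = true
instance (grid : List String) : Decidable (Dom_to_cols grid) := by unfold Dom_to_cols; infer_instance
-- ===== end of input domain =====

-- B replaces A's per-column scan of all rows by a staged sparse pass: collect the column
-- positions of every '#' row by row, count them with a hash counter, read the answer off it.

-- ===== PORT A =====
def to_cols (grid : List String) : List Int :=
  (PySem.List.pyRange 0 (PySem.Str.len (PySem.List.pyGetD grid 0 ""))).foldl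
    (fun res x =>
      res ++ [((PySem.List.pyRange 0 (PySem.List.len grid)).foldl
        (fun height y =>
          if PySem.List.pyGetD (PySem.List.pyGetD grid y "").toList x ' ' = '#' then height + 1
          else height) 0) - 1]) []

-- ===== PORT B =====
def to_cols_alt (grid : List String) : List Int :=
  let positions : List Int := grid.foldl (fun ps row =>
    (PySem.List.enumerate row.toList 0).foldl
      (fun ps p => if p.2 = '#' then ps ++ [p.1] else ps) ps) []
  let counts : PySem.Dict Int Int :=
    positions.foldl (fun d x => d.insert x (d.getD x 0 + 1)) PySem.Dict.empty
  (PySem.List.pyRange 0 (PySem.Str.len (PySem.List.pyGetD grid 0 ""))).map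
    (fun x => counts.getD x 0 - 1)

-- ===== PRECONDITION & SPEC =====
-- Pre_ excludes exactly the inputs where A raises IndexError: the empty grid (grid[0]) and
-- grids with a row shorter than the first row (grid[y][x]).
def Pre_to_cols (grid : List String) : Prop :=
  grid ≠ [] ∧ ∀ row ∈ grid, (PySem.List.pyGetD grid 0 "").toList.length ≤ row.toList.length
instance (grid : List String) : Decidable (Pre_to_cols grid) := by unfold Pre_to_cols; infer_instance
def pvWitness_to_cols : List String := ["#.#", "##."]
def Spec_to_cols (grid : List String) (out : List Int) : Prop := out = to_cols_alt grid
instance (grid : List String) (out : List Int) : Decidable (Spec_to_cols grid out) := by unfold Spec_to_cols; infer_instance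

-- ===== CLAIM (what is proved, stated in full; the proofs are below) =====
def Claim_equal_to_cols : Prop := ∀ (grid : List String), Dom_to_cols grid → Pre_to_cols grid → Spec_to_cols grid (to_cols grid)

-- ===== LEMMAS AND PROOFS =====

-- the 0/1 contribution of a row to column x
def pvInd (row : String) (x : Int) : Int :=
  if PySem.List.pyGetD row.toList x ' ' = '#' then 1 else 0

-- the column positions of '#' contributed by one row (B's inner loop, flattened)
def pvRowPos (row : String) : List Int :=
  ((PySem.List.enumerate row.toList 0).filter (fun p => p.2 = '#')).map (·.1)

theorem pvRowPos_count (l : List Char) (s x : Int) :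
    (((PySem.List.enumerate l s).filter (fun p => p.2 = '#')).map (·.1)).count x
    = if s ≤ x ∧ x - s < l.length ∧ l.getD (x - s).toNat ' ' = '#' then 1 else 0 := by
  induction l generalizing s with
  | nil => simp
  | cons c l ih =>
      rw [PySem.List.enumerate_cons]
      by_cases hx : x = s
      · subst hx
        have hz : (((PySem.List.enumerate l (x + 1)).filter (fun p => p.2 = '#')).map (·.1)).count x = 0 := by
          rw [ih, if_neg]
          intro h
          exact absurd h.1 (by omega)
        by_cases hc : c = '#'
        · rw [List.filter_cons_of_pos (by simp [hc]), List.map_cons]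
          simp only [List.count_cons, beq_iff_eq, if_true, hz]
          rw [if_pos ⟨le_refl _, by simp, by simp [hc]⟩]
        · rw [List.filter_cons_of_neg (by simp [hc]), hz, if_neg]
          rintro ⟨-, -, hg⟩
          simp at hg
          exact hc hg
      · have heq : (s + 1 ≤ x ∧ x - (s + 1) < (l.length : Int) ∧ l.getD (x - (s + 1)).toNat ' ' = '#')
            ↔ (s ≤ x ∧ x - s < ((c :: l).length : Int) ∧ (c :: l).getD (x - s).toNat ' ' = '#') := by
          constructor
          · rintro ⟨ha, hb, hg⟩
            refine ⟨by omega, by simp; omega, ?_⟩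
            have h' : (x - s).toNat = (x - (s + 1)).toNat + 1 := by omega
            rw [h']; simpa using hg
          · rintro ⟨ha, hb, hg⟩
            refine ⟨by omega, by simp at hb; omega, ?_⟩
            have h' : (x - s).toNat = (x - (s + 1)).toNat + 1 := by omega
            rw [h'] at hg; simpa using hg
        by_cases hc : c = '#'
        · rw [List.filter_cons_of_pos (by simp [hc]), List.map_cons]
          simp only [List.count_cons, beq_iff_eq]
          rw [ih, if_congr heq rfl rfl,
            if_neg (show ¬(s = x) from fun h => hx h.symm), add_zero]
        · rw [List.filter_cons_of_neg (by simp [hc]), ih, if_congr heq rfl rfl]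

-- for nonnegative x, one row's position count is exactly A's 0/1 indicator
theorem pvRowPos_count_eq_ind (row : String) (x : Int) (hx : 0 ≤ x) :
    ((pvRowPos row).count x : Int) = pvInd row x := by
  unfold pvRowPos pvInd
  rw [pvRowPos_count row.toList 0 x]
  simp only [sub_zero]
  have hxx : x = ((x.toNat : Nat) : Int) := by omega
  rw [hxx, PySem.List.pyGetD_natCast]
  by_cases hc : row.toList.getD x.toNat ' ' = '#'
  · have hlt : x.toNat < row.toList.length := by
      by_contra h
      rw [List.getD_eq_default _ _ (by omega)] at hc
      exact absurd hc (by decide)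
    rw [if_pos hc,
      if_pos ⟨Int.natCast_nonneg _, by exact_mod_cast hlt,
        by simp only [Int.toNat_natCast]; exact hc⟩]
    norm_num
  · have hb : ¬ (0 ≤ ((x.toNat : Nat) : Int) ∧ ((x.toNat : Nat) : Int) < (row.toList.length : Int)
        ∧ row.toList.getD (((x.toNat : Nat) : Int)).toNat ' ' = '#') := by
      rintro ⟨-, -, hg⟩
      exact hc (by simp only [Int.toNat_natCast] at hg; exact hg)
    rw [if_neg hc, if_neg hb]
    norm_num

-- 'if c == "#": out.append(x)' over a list of (index, char) pairs, as filter+map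
theorem pvFoldAppendIf (l : List (Int × Char)) (acc : List Int) :
    l.foldl (fun ps p => if p.2 = '#' then ps ++ [p.1] else ps) acc
    = acc ++ (l.filter (fun p => p.2 = '#')).map (·.1) := by
  induction l generalizing acc with
  | nil => simp
  | cons p l ih =>
      by_cases hc : p.2 = '#'
      · simp [hc, ih, List.append_assoc]
      · simp [hc, ih]

-- B's first loop equals the flattened per-row position lists
theorem pvPositions_eq (grid : List String) (acc : List Int) :
    grid.foldl (fun ps row =>
      (PySem.List.enumerate row.toList 0).foldl
        (fun ps p => if p.2 = '#' then ps ++ [p.1] else ps) ps) acc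
    = acc ++ grid.flatMap pvRowPos := by
  induction grid generalizing acc with
  | nil => simp
  | cons row grid ih =>
      simp only [List.foldl_cons, List.flatMap_cons]
      rw [pvFoldAppendIf, ih, List.append_assoc]
      rfl

-- A's inner loop is the sum of the per-row indicators
theorem pvColSum (grid : List String) (x : Int) :
    ((PySem.List.pyRange 0 (PySem.List.len grid)).foldl
      (fun height y =>
        if PySem.List.pyGetD (PySem.List.pyGetD grid y "").toList x ' ' = '#' then height + 1
        else height) 0)
    = (grid.map (fun row => pvInd row x)).sum := by
  rw [PySem.List.foldl_pyRange_zero_pyGetD grid ""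
    (fun height row => if PySem.List.pyGetD row.toList x ' ' = '#' then height + 1 else height) 0]
  have : (fun (height : Int) (row : String) =>
      if PySem.List.pyGetD row.toList x ' ' = '#' then height + 1 else height)
      = fun height row => height + pvInd row x := by
    funext h row
    by_cases hc : PySem.List.pyGetD row.toList x ' ' = '#' <;> simp [pvInd, hc]
  rw [this, PySem.List.foldl_add]
  simp

theorem pvFlat_count (grid : List String) (x : Int) (hx : 0 ≤ x) :
    ((grid.flatMap pvRowPos).count x : Int) = (grid.map (fun row => pvInd row x)).sum := by
  induction grid with
  | nil => simp
  | cons row grid ih =>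
      simp only [List.flatMap_cons, List.map_cons, List.sum_cons, List.count_append]
      push_cast
      rw [ih, pvRowPos_count_eq_ind row x hx]

-- ===== VERDICT (by name: the statement is the Claim_ definition above) =====
theorem to_cols_spec : Claim_equal_to_cols := by
  intro grid _ _
  unfold Spec_to_cols to_cols to_cols_alt
  simp only []
  rw [PySem.List.foldl_append_singleton_eq_map
    (fun x => ((PySem.List.pyRange 0 (PySem.List.len grid)).foldl
        (fun height y =>
          if PySem.List.pyGetD (PySem.List.pyGetD grid y "").toList x ' ' = '#' then height + 1
          else height) 0) - 1)]
  rw [List.nil_append]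
  apply List.map_congr_left
  intro x hx
  have hx0 : 0 ≤ x := ((PySem.List.mem_pyRange_one).1 hx).1
  rw [pvColSum, pvPositions_eq, List.nil_append,
    PySem.Dict.getD_foldl_insert_add_one, pvFlat_count grid x hx0]
  simp
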